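-- pv_equiv track=rewrite | github.com/PrajaktaBade/AWS_E_Commerce_analytics_ETL | PycharmProjects/pythonProject1/Assignment_5_1.py | capitalized_odd_letters
-- ===== SOURCE A (Python) =====
-- def capitalized_odd_letters(s):
--     result = ""
--     for i in range(len(s)):
--         if i % 2 == 1:
--             result += s[i].upper()
--         else:
--             result += s[i]
--     return result
-- ===== SOURCE B (Python) =====
-- def capitalized_odd_letters(s):
--     parts = []
--     t = s
--     while len(t) >= 2:
--         parts.append(t[0] + t[1].upper())
--         t = t[2:]
--     parts.append(t)
--     return "".join(parts)
-- ===== Notes on version B (the rewrite author's own statement) =====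
-- stated objective: alternative
-- what changed: Replaces the per-index parity branch with string += by a pairwise chunk consumer: the string is eaten two characters at a time, each chunk emitted as first char plus uppercased second char, collected in a list and joined once.
import Mathlib
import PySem

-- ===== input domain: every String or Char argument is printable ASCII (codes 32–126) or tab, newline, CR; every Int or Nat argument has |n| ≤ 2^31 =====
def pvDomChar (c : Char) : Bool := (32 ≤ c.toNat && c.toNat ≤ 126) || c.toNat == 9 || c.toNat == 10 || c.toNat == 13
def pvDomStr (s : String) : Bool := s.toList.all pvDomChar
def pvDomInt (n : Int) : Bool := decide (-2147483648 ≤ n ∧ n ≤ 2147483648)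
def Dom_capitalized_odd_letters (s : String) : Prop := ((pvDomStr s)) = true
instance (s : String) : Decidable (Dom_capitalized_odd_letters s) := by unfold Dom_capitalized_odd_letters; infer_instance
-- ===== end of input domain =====

-- B replaces A's per-index parity branch (with string +=) by a pairwise two-characters-at-a-time
-- chunk consumer joined once at the end (objective: alternative decomposition).


-- ===== PORT A =====
-- for i in range(len(s)): result += s[i].upper() if i % 2 == 1 else s[i]
def capitalized_odd_letters (s : String) : String :=
  String.ofList ((PySem.List.pyRange 0 s.toList.length 1).foldl
    (fun result i =>
      result ++ (if PySem.Int.mod i 2 = 1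
                 then PySem.Chars.upper [PySem.List.pyGetD s.toList i ' ']
                 else [PySem.List.pyGetD s.toList i ' '])) [])

-- ===== PORT B =====
-- while len(t) >= 2: parts.append(t[0] + t[1].upper()); t = t[2:]; then append the rest, join.
def pvAltGo (t : List Char) : List (List Char) :=
  match t with
  | a :: b :: rest => (a :: PySem.Chars.upper [b]) :: pvAltGo rest
  | t => [t]

def capitalized_odd_letters_alt (s : String) : String :=
  String.ofList (pvAltGo s.toList).flatten

-- ===== PRECONDITION & SPEC =====
def Spec_capitalized_odd_letters (s : String) (out : String) : Prop :=
  out = capitalized_odd_letters_alt s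
instance (s : String) (out : String) : Decidable (Spec_capitalized_odd_letters s out) := by
  unfold Spec_capitalized_odd_letters; infer_instance

-- ===== CLAIM =====
def Claim_equal_capitalized_odd_letters : Prop :=
  ∀ (s : String), Dom_capitalized_odd_letters s →
    Spec_capitalized_odd_letters s (capitalized_odd_letters s)

-- ===== LEMMAS AND PROOFS =====
def pvStep (cs : List Char) (i : Int) : List Char :=
  if PySem.Int.mod i 2 = 1
  then PySem.Chars.upper [PySem.List.pyGetD cs i ' ']
  else [PySem.List.pyGetD cs i ' ']

lemma pvA_flat (cs : List Char) :
    (PySem.List.pyRange 0 cs.length 1).foldl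
      (fun result i => result ++ pvStep cs i) [] =
    (List.range cs.length).flatMap (fun i : Nat => pvStep cs (i : Int)) := by
  rw [PySem.List.foldl_append_eq_flatMap, PySem.List.pyRange_zero_natCast, List.flatMap_map]
  rfl

lemma pvStep_cast (cs : List Char) (i : Nat) :
    pvStep cs (i : Int) =
      (if i % 2 = 1 then [PySem.Chars.upperChar (cs.getD i ' ')] else [cs.getD i ' ']) := by
  simp only [pvStep, PySem.List.pyGetD_natCast]
  have : PySem.Int.mod (i : Int) 2 = ((i % 2 : Nat) : Int) := by
    simp [PySem.Int.mod, Int.fmod_eq_emod]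
  rw [this]
  rcases Nat.mod_two_eq_zero_or_one i with h | h <;> simp [h, PySem.Chars.upper]

lemma pvGo_eq : ∀ (cs : List Char),
    (List.range cs.length).flatMap
      (fun i => if i % 2 = 1 then [PySem.Chars.upperChar (cs.getD i ' ')] else [cs.getD i ' ']) =
    (pvAltGo cs).flatten := by
  intro cs
  induction cs using pvAltGo.induct with
  | case1 a b rest ih =>
    have hlen : (a :: b :: rest).length = 2 + rest.length := by
      simp only [List.length_cons]; omega
    rw [hlen, List.range_add, List.flatMap_append, List.flatMap_map]
    have hfun : (fun i : Nat =>
          if (2 + i) % 2 = 1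
          then [PySem.Chars.upperChar ((a :: b :: rest).getD (2 + i) ' ')]
          else [(a :: b :: rest).getD (2 + i) ' ']) =
        (fun i : Nat => if i % 2 = 1 then [PySem.Chars.upperChar (rest.getD i ' ')]
                  else [rest.getD i ' ']) := by
      funext i
      have hm : (2 + i) % 2 = i % 2 := by omega
      have hg : (a :: b :: rest).getD (2 + i) ' ' = rest.getD i ' ' := by
        rw [Nat.add_comm]; simp
      rw [hm, hg]
    rw [hfun, ih]
    simp [pvAltGo, PySem.Chars.upper, List.range_succ]
  | case2 t h =>
    cases t with
    | nil => simp [pvAltGo]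
    | cons a t' =>
      cases t' with
      | nil => simp [pvAltGo, List.range_succ]
      | cons b t'' => exact absurd rfl (fun hh => h a b t'' hh)

-- ===== VERDICT =====
theorem capitalized_odd_letters_spec : Claim_equal_capitalized_odd_letters := by
  intro s _
  unfold Spec_capitalized_odd_letters capitalized_odd_letters capitalized_odd_letters_alt
  have h := pvA_flat s.toList
  simp only [pvStep] at h
  rw [h]
  congr 1
  rw [show (fun i : Nat => if PySem.Int.mod (i : Int) 2 = 1
        then PySem.Chars.upper [PySem.List.pyGetD s.toList (i : Int) ' ']
        else [PySem.List.pyGetD s.toList (i : Int) ' ']) =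
      (fun i : Nat => if i % 2 = 1 then [PySem.Chars.upperChar (s.toList.getD i ' ')]
        else [s.toList.getD i ' ']) from funext fun i => pvStep_cast s.toList i]
  exact pvGo_eq s.toList
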